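-- pv_equiv track=rewrite | github.com/saltbo/learn-py | algo/graphs/riverSizes.py | riverSizes
-- ===== SOURCE A (Python) =====
-- def riverSizes(matrix):
--     rowLength = len(matrix)
--     colLength = len(matrix[0])
--
--     sizes = []
--     visited = set()
--     for rowIdx in range(rowLength):
--         for colIdx in range(colLength):
--             if (rowIdx, colIdx) not in visited and matrix[rowIdx][colIdx] == 1:
--                 sizes.append(dfs(matrix, rowIdx, colIdx, visited))
--
--     return sizes
--
-- def dfs(matrix, rowIdx, colIdx, visited: set):
--     if (rowIdx not in range(len(matrix)) or colIdx not in range(len(matrix[0])) or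
--             matrix[rowIdx][colIdx] == 0 or (rowIdx, colIdx) in visited):
--         return 0
--
--     visited.add((rowIdx, colIdx))
--
--     size = 0
--     directions = [(0, 1), (1, 0), (0, -1), (-1, 0)]
--     for dx, dy in directions:
--         size += dfs(matrix, rowIdx+dx, colIdx+dy, visited)
--
--     return size+1
-- ===== SOURCE B (Python) =====
-- def riverSizes(matrix):
--     rows = len(matrix)
--     cols = len(matrix[0])
--     sizes = []
--     visited = set()
--     for r in range(rows):
--         for c in range(cols):
--             if (r, c) not in visited and matrix[r][c] == 1:
--                 visited.add((r, c))
--                 stack = [(r, c)]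
--                 count = 0
--                 while stack:
--                     cr, cc = stack.pop()
--                     count += 1
--                     for nb in ((cr, cc + 1), (cr + 1, cc), (cr, cc - 1), (cr - 1, cc)):
--                         nr, nc = nb
--                         if (0 <= nr < rows and 0 <= nc < cols
--                                 and matrix[nr][nc] != 0 and nb not in visited):
--                             visited.add(nb)
--                             stack.append(nb)
--                 sizes.append(count)
--     return sizes
-- ===== Notes on version B (the rewrite author's own statement) =====
-- stated objective: alternative
-- what changed: Replaces the recursive DFS (which sums the return values of four recursive calls per cell) with an iterative explicit-stack flood fill that marks cells visited at push time and counts pops.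
import Mathlib
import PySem

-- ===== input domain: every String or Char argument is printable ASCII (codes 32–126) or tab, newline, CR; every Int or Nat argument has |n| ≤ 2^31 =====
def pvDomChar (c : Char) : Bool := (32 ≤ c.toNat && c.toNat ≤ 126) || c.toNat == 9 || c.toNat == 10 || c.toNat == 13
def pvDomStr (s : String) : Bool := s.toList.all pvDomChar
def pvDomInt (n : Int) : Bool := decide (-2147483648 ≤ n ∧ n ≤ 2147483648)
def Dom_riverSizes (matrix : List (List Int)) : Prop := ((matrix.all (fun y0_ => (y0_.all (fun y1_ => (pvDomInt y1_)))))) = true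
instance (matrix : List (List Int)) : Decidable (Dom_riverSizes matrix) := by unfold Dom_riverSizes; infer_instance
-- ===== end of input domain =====

-- B replaces A's recursive DFS (summing four recursive calls per cell) by an iterative
-- explicit-stack flood fill that marks cells at push time and counts pops (objective: alternative).
-- A mutates no argument; B likewise.  The return value is what is compared.

-- shared indexing helper: matrix[r][c]; the default is never reached where the ports read it,
-- because both Pythons bounds-check r and c first and Pre_ rules out ragged short rows
def pvGet2 (m : List (List Int)) (r c : Int) : Int :=
  PySem.List.pyGetD (PySem.List.pyGetD m r []) c 0

-- ===== PORT A =====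
-- dfs(matrix, rowIdx, colIdx, visited); fuel = rows*cols+1 is a totality guard, never exhausted
def dfsA (m : List (List Int)) : Nat → Int → Int → List (Int × Int) → Int × List (Int × Int)
  | 0, _, _, vis => (0, vis)
  | f+1, r, c, vis =>
    if ¬(0 ≤ r ∧ r < (m.length : Int)) ∨ ¬(0 ≤ c ∧ c < ((m.headD []).length : Int))
        ∨ pvGet2 m r c = 0 ∨ (r, c) ∈ vis then
      (0, vis)
    else
      let vis1 := vis ++ [(r, c)]
      let p := [((0:Int),(1:Int)), (1,0), (0,-1), (-1,0)].foldl
        (fun acc d =>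
          let q := dfsA m f (r + d.1) (c + d.2) acc.2
          (acc.1 + q.1, q.2)) ((0:Int), vis1)
      (p.1 + 1, p.2)

def riverSizes (matrix : List (List Int)) : List Int :=
  let rows := matrix.length
  let cols := (matrix.headD []).length
  let st := (List.range rows).foldl (fun (st : List Int × List (Int × Int)) (rowIdx : Nat) =>
    (List.range cols).foldl (fun (st : List Int × List (Int × Int)) (colIdx : Nat) =>
      if ((rowIdx : Int), (colIdx : Int)) ∉ st.2 ∧ pvGet2 matrix rowIdx colIdx = 1 then
        let q := dfsA matrix (rows * cols + 1) rowIdx colIdx st.2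
        (st.1 ++ [q.1], q.2)
      else st) st) (([] : List Int), ([] : List (Int × Int)))
  st.1

-- ===== PORT B =====
-- the while loop: pop a cell, count it, push the four unvisited in-bounds nonzero neighbours
-- (stack top = list head); fuel = 2*rows*cols+2 is a totality guard, never exhausted
def floodB (m : List (List Int)) : Nat → List (Int × Int) → List (Int × Int) → Int → Int × List (Int × Int)
  | 0, _, vis, count => (count, vis)
  | f+1, stack, vis, count =>
    match stack with
    | [] => (count, vis)
    | (cr, cc) :: rest =>
      let sv := [(cr, cc + 1), (cr + 1, cc), (cr, cc - 1), (cr - 1, cc)].foldl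
        (fun (sv : List (Int × Int) × List (Int × Int)) nb =>
          if 0 ≤ nb.1 ∧ nb.1 < (m.length : Int) ∧ 0 ≤ nb.2 ∧ nb.2 < ((m.headD []).length : Int)
              ∧ pvGet2 m nb.1 nb.2 ≠ 0 ∧ nb ∉ sv.2
          then (nb :: sv.1, sv.2 ++ [nb]) else sv) (rest, vis)
      floodB m f sv.1 sv.2 (count + 1)

def riverSizes_alt (matrix : List (List Int)) : List Int :=
  let rows := matrix.length
  let cols := (matrix.headD []).length
  let st := (List.range rows).foldl (fun (st : List Int × List (Int × Int)) (r : Nat) =>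
    (List.range cols).foldl (fun (st : List Int × List (Int × Int)) (c : Nat) =>
      if ((r : Int), (c : Int)) ∉ st.2 ∧ pvGet2 matrix r c = 1 then
        let q := floodB matrix (2 * rows * cols + 2) [((r : Int), (c : Int))]
                   (st.2 ++ [((r : Int), (c : Int))]) 0
        (st.1 ++ [q.1], q.2)
      else st) st) (([] : List Int), ([] : List (Int × Int)))
  st.1

-- ===== PRECONDITION & SPEC =====
-- Pre_ excludes exactly the inputs on which Python A raises IndexError: the empty matrix
-- (len(matrix[0])) and matrices with a row shorter than row 0 (matrix[rowIdx][colIdx]).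
def Pre_riverSizes (matrix : List (List Int)) : Prop :=
  matrix ≠ [] ∧ ∀ row ∈ matrix, (matrix.headD []).length ≤ row.length
instance (matrix : List (List Int)) : Decidable (Pre_riverSizes matrix) := by
  unfold Pre_riverSizes; infer_instance

def pvWitness_riverSizes : List (List Int) := [[1, 0], [1, 1]]

def Spec_riverSizes (matrix : List (List Int)) (out : List Int) : Prop := out = riverSizes_alt matrix
instance (matrix : List (List Int)) (out : List Int) : Decidable (Spec_riverSizes matrix out) := by unfold Spec_riverSizes; infer_instance

-- ===== CLAIM (what is proved, stated in full; the proofs are below) =====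
def Claim_equal_riverSizes : Prop := ∀ (matrix : List (List Int)), Dom_riverSizes matrix → Pre_riverSizes matrix → Spec_riverSizes matrix (riverSizes matrix)

-- ===== LEMMAS AND PROOFS =====

-- cell predicates and the visited-counting measure
def pvInb (m : List (List Int)) (p : Int × Int) : Prop :=
  0 ≤ p.1 ∧ p.1 < (m.length : Int) ∧ 0 ≤ p.2 ∧ p.2 < ((m.headD []).length : Int)

def pvOk (m : List (List Int)) (p : Int × Int) : Prop := pvInb m p ∧ pvGet2 m p.1 p.2 ≠ 0

def pvAdj (p : Int × Int) : List (Int × Int) :=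
  [(p.1, p.2 + 1), (p.1 + 1, p.2), (p.1, p.2 - 1), (p.1 - 1, p.2)]

def pvGrid (m : List (List Int)) : List (Int × Int) :=
  (List.range m.length).flatMap (fun r => (List.range (m.headD []).length).map (fun c => ((r : Int), (c : Int))))

def pvUnvis (m : List (List Int)) (vis : List (Int × Int)) : Nat :=
  ((pvGrid m).filter (fun p => decide (p ∉ vis))).length

-- T is closed under stepping to ok cells, from cells outside base
def ClosedOn (m : List (List Int)) (base : List (Int × Int)) (T : Int × Int → Prop) : Prop :=
  ∀ a, T a → a ∉ base → ∀ b ∈ pvAdj a, pvOk m b → b ∉ base → T b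

theorem closedOn_mono {m : List (List Int)} {base base' : List (Int × Int)} {T : Int × Int → Prop}
    (hsub : ∀ x ∈ base, x ∈ base') (h : ClosedOn m base T) : ClosedOn m base' T := by
  intro a ha hab b hb hob hnb
  exact h a ha (fun hc => hab (hsub a hc)) b hb hob (fun hc => hnb (hsub b hc))

theorem mem_pvGrid {m : List (List Int)} {p : Int × Int} : p ∈ pvGrid m ↔ pvInb m p := by
  obtain ⟨x, y⟩ := p
  unfold pvGrid pvInb
  simp [List.mem_flatMap, List.mem_map, List.mem_range]
  constructor
  · rintro ⟨⟨r, hr, rfl⟩, ⟨c, hc, rfl⟩⟩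
    exact ⟨by omega, by exact_mod_cast hr, by omega, by exact_mod_cast hc⟩
  · rintro ⟨h1, h2, h3, h4⟩
    exact ⟨⟨x.toNat, by omega, by omega⟩, ⟨y.toNat, by omega, by omega⟩⟩

theorem pvUnvis_mono {m : List (List Int)} {v v' : List (Int × Int)}
    (h : ∀ x ∈ v, x ∈ v') : pvUnvis m v' ≤ pvUnvis m v := by
  unfold pvUnvis
  simp only [← List.countP_eq_length_filter]
  apply List.countP_mono_left
  intro x _ hx
  simp only [decide_eq_true_eq] at *
  intro hxv
  exact hx (h x hxv)

theorem pvUnvis_lt {m : List (List Int)} {v : List (Int × Int)} {p : Int × Int}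
    (hin : pvInb m p) (hnot : p ∉ v) : pvUnvis m (v ++ [p]) < pvUnvis m v := by
  have hp : p ∈ pvGrid m := mem_pvGrid.mpr hin
  obtain ⟨s, t, hst⟩ := List.append_of_mem hp
  unfold pvUnvis
  rw [hst]
  simp only [List.filter_append, List.filter_cons, List.length_append]
  have h1 : (List.filter (fun q => decide (q ∉ v ++ [p])) s).length ≤
      (List.filter (fun q => decide (q ∉ v)) s).length := by
    simp only [← List.countP_eq_length_filter]
    apply List.countP_mono_left
    intro x _ hx
    simp only [decide_eq_true_eq, List.mem_append] at *
    tauto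
  have h2 : (List.filter (fun q => decide (q ∉ v ++ [p])) t).length ≤
      (List.filter (fun q => decide (q ∉ v)) t).length := by
    simp only [← List.countP_eq_length_filter]
    apply List.countP_mono_left
    intro x _ hx
    simp only [decide_eq_true_eq, List.mem_append] at *
    tauto
  have hpf : (decide (p ∉ v ++ [p])) = false := by simp
  have hpt : (decide (p ∉ v)) = true := by simpa using hnot
  rw [hpf, hpt]
  simp only [Bool.false_eq_true, if_false, if_true, List.length_cons]
  omega

theorem pvUnvis_le (m : List (List Int)) (v : List (Int × Int)) :
    pvUnvis m v ≤ m.length * (m.headD []).length := by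
  have h1 : pvUnvis m v ≤ (pvGrid m).length := List.length_filter_le _ _
  have h2 : (pvGrid m).length = m.length * (m.headD []).length := by
    unfold pvGrid
    rw [List.length_flatMap]
    have : (List.map (fun r => ((List.range (m.headD []).length).map
        (fun c => ((r : Int), (c : Int)))).length) (List.range m.length))
        = List.replicate m.length (m.headD []).length := by
      rw [List.eq_replicate_iff]
      simp
    rw [this, List.sum_replicate]
    simp
  omega

theorem nodup_disj {α : Type} {l₁ l₂ : List α} (h : (l₁ ++ l₂).Nodup) {x : α}
    (hx : x ∈ l₂) : x ∉ l₁ := by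
  intro hc
  exact List.disjoint_of_nodup_append h hc hx

-- post-condition of A's dfs
def PostA (m : List (List Int)) (r c : Int) (vis : List (Int × Int)) (out : Int × List (Int × Int)) : Prop :=
  ∃ added : List (Int × Int),
    out = ((added.length : Int), vis ++ added) ∧
    (vis ++ added).Nodup ∧
    (∀ x ∈ added, pvOk m x) ∧
    ((pvOk m (r, c) ∧ (r, c) ∉ vis) → (r, c) ∈ vis ++ added) ∧
    (∀ a ∈ added, ∀ b ∈ pvAdj a, pvOk m b → b ∈ vis ++ added) ∧
    (∀ T : Int × Int → Prop, (∀ x ∈ vis, T x) → ((pvOk m (r, c) ∧ (r, c) ∉ vis) → T (r, c)) →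
      ClosedOn m vis T → ∀ x ∈ vis ++ added, T x)

theorem foldA_post (m : List (List Int)) (f : Nat)
    (IH : ∀ r c vis, pvUnvis m vis < f → List.Nodup vis → PostA m r c vis (dfsA m f r c vis)) :
    ∀ (ds : List (Int × Int)) (r c : Int) (base vis : List (Int × Int)) (n : Int),
    pvUnvis m vis < f → vis.Nodup → (∀ x ∈ base, x ∈ vis) →
    (∀ d ∈ ds, (r + d.1, c + d.2) ∈ pvAdj (r, c)) →
    ∃ added : List (Int × Int),
      (ds.foldl (fun acc d => let q := dfsA m f (r + d.1) (c + d.2) acc.2;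
          (acc.1 + q.1, q.2)) (n, vis)) = (n + (added.length : Int), vis ++ added) ∧
      (vis ++ added).Nodup ∧
      (∀ x ∈ added, pvOk m x) ∧
      (∀ d ∈ ds, pvOk m (r + d.1, c + d.2) → (r + d.1, c + d.2) ∈ vis ++ added) ∧
      (∀ a ∈ added, ∀ b ∈ pvAdj a, pvOk m b → b ∈ vis ++ added) ∧
      (∀ T : Int × Int → Prop, ClosedOn m base T → T (r, c) → (r, c) ∉ base →
        (∀ x ∈ vis, T x) → ∀ x ∈ vis ++ added, T x) := by
  intro ds
  induction ds with
  | nil =>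
    intro r c base vis n hf hN hb hd
    refine ⟨[], by simp, by simpa using hN, by simp, by simp, by simp, ?_⟩
    intro T _ _ _ hT x hx
    simp only [List.append_nil] at hx
    exact hT x hx
  | cons d ds ih =>
    intro r c base vis n hf hN hb hd
    simp only [List.foldl_cons]
    obtain ⟨added₁, a1, a2, a3, a4, a5, a6⟩ := IH (r + d.1) (c + d.2) vis hf hN
    rw [a1]
    have hmono : pvUnvis m (vis ++ added₁) ≤ pvUnvis m vis :=
      pvUnvis_mono (fun x hx => List.mem_append_left _ hx)
    have hb' : ∀ x ∈ base, x ∈ vis ++ added₁ := fun x hx => List.mem_append_left _ (hb x hx)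
    obtain ⟨added₂, g1, g2, g3, g4, g5, g6⟩ :=
      ih r c base (vis ++ added₁) (n + (added₁.length : Int)) (by omega) a2 hb'
        (fun e he => hd e (List.mem_cons_of_mem _ he))
    refine ⟨added₁ ++ added₂, ?_, ?_, ?_, ?_, ?_, ?_⟩
    · rw [g1, Prod.mk.injEq]
      constructor
      · simp only [List.length_append]; push_cast; ring
      · simp [List.append_assoc]
    · simpa [List.append_assoc] using g2
    · intro x hx
      rcases List.mem_append.mp hx with hx | hx
      · exact a3 x hx
      · exact g3 x hx
    · intro e he heok
      have hsub : ∀ y, y ∈ (vis ++ added₁) ++ added₂ → y ∈ vis ++ (added₁ ++ added₂) := by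
        intro y hy; simpa [List.append_assoc] using hy
      rcases List.mem_cons.mp he with rfl | he
      · by_cases hv : (r + e.1, c + e.2) ∈ vis
        · exact List.mem_append_left _ hv
        · exact hsub _ (List.mem_append_left _ (a4 ⟨heok, hv⟩))
      · exact hsub _ (g4 e he heok)
    · intro a ha b hbadj hbok
      have hsub : ∀ y, y ∈ (vis ++ added₁) ++ added₂ → y ∈ vis ++ (added₁ ++ added₂) := by
        intro y hy; simpa [List.append_assoc] using hy
      rcases List.mem_append.mp ha with ha | ha
      · exact hsub _ (List.mem_append_left _ (a5 a ha b hbadj hbok))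
      · exact hsub _ (g5 a ha b hbadj hbok)
    · intro T hcl hTrc hrcb hT x hx
      have hT1 : ∀ y ∈ vis ++ added₁, T y := by
        refine a6 T hT ?_ ?_
        · rintro ⟨hok1, hnv1⟩
          have hnb : (r + d.1, c + d.2) ∉ base := fun hc => hnv1 (hb _ hc)
          exact hcl (r, c) hTrc hrcb _ (hd d List.mem_cons_self) hok1 hnb
        · exact closedOn_mono hb hcl
      have := g6 T hcl hTrc hrcb hT1
      rcases List.mem_append.mp hx with hx | hx
      · exact hT x (by exact hx)
      · rcases List.mem_append.mp hx with hx | hx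
        · exact hT1 x (List.mem_append_right _ hx)
        · exact this x (List.mem_append_right _ hx)
      
theorem dfsA_post (m : List (List Int)) :
    ∀ f (r c : Int) (vis : List (Int × Int)), pvUnvis m vis < f → vis.Nodup →
    PostA m r c vis (dfsA m f r c vis) := by
  intro f
  induction f with
  | zero => intro r c vis hf; omega
  | succ f ih =>
    intro r c vis hf hN
    by_cases hg : ¬(0 ≤ r ∧ r < (m.length : Int)) ∨ ¬(0 ≤ c ∧ c < ((m.headD []).length : Int))
        ∨ pvGet2 m r c = 0 ∨ (r, c) ∈ vis
    · have hstep : dfsA m (f + 1) r c vis = (0, vis) := by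
        show (if _ then _ else _) = _
        rw [if_pos hg]
      rw [hstep]
      refine ⟨[], by simp, by simpa using hN, by simp, ?_, by simp, ?_⟩
      · rintro ⟨⟨hin, hval⟩, hnv⟩
        rcases hg with h | h | h | h
        · exact absurd ⟨hin.1, hin.2.1⟩ h
        · exact absurd ⟨hin.2.2.1, hin.2.2.2⟩ h
        · exact absurd h hval
        · exact absurd h hnv
      · intro T hT _ _ x hx
        simp only [List.append_nil] at hx
        exact hT x hx
    · push_neg at hg
      obtain ⟨hr, hc, hval, hnv⟩ := hg
      have hok : pvOk m (r, c) := ⟨⟨hr.1, hr.2, hc.1, hc.2⟩, hval⟩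
      have hN1 : (vis ++ [(r, c)]).Nodup := by
        rw [List.nodup_append]
        refine ⟨hN, List.nodup_singleton _, ?_⟩
        intro a ha b hb
        simp only [List.mem_singleton] at hb
        subst hb
        exact fun h => hnv (h ▸ ha)
      have hf1 : pvUnvis m (vis ++ [(r, c)]) < f := by
        have := pvUnvis_lt (m := m) hok.1 hnv
        omega
      have hds : ∀ d ∈ [((0:Int),(1:Int)), (1,0), (0,-1), (-1,0)],
          (r + d.1, c + d.2) ∈ pvAdj (r, c) := by
        intro d hd
        simp only [List.mem_cons, List.not_mem_nil, or_false] at hd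
        rcases hd with rfl | rfl | rfl | rfl <;> simp [pvAdj, sub_eq_add_neg]
      obtain ⟨added', q1, q2, q3, q4, q5, q6⟩ :=
        foldA_post m f ih [((0:Int),(1:Int)), (1,0), (0,-1), (-1,0)] r c vis (vis ++ [(r, c)]) 0
          hf1 hN1 (fun x hx => List.mem_append_left _ hx) hds
      have hstep : dfsA m (f + 1) r c vis =
          ((([((0:Int),(1:Int)), (1,0), (0,-1), (-1,0)].foldl
            (fun acc d => let q := dfsA m f (r + d.1) (c + d.2) acc.2;
              (acc.1 + q.1, q.2)) ((0:Int), vis ++ [(r, c)])).1 + 1),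
           ([((0:Int),(1:Int)), (1,0), (0,-1), (-1,0)].foldl
            (fun acc d => let q := dfsA m f (r + d.1) (c + d.2) acc.2;
              (acc.1 + q.1, q.2)) ((0:Int), vis ++ [(r, c)])).2) := by
        show (if _ then _ else _) = _
        rw [if_neg ?_]
        · push_neg
          exact ⟨hr, hc, hval, hnv⟩
      rw [hstep, q1]
      refine ⟨(r, c) :: added', ?_, ?_, ?_, ?_, ?_, ?_⟩
      · rw [Prod.mk.injEq]
        constructor
        · simp only [List.length_cons]; push_cast; ring
        · simp [List.append_assoc]
      · simpa [List.append_assoc] using q2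
      · intro x hx
        rcases List.mem_cons.mp hx with rfl | hx
        · exact hok
        · exact q3 x hx
      · intro _
        simp
      · intro a ha b hbadj hbok
        have hsub : ∀ y, y ∈ (vis ++ [(r, c)]) ++ added' → y ∈ vis ++ (r, c) :: added' := by
          intro y hy; simpa [List.append_assoc] using hy
        rcases List.mem_cons.mp ha with rfl | ha
        · -- neighbours of the seed
          have : ∃ d ∈ [((0:Int),(1:Int)), (1,0), (0,-1), (-1,0)], b = (r + d.1, c + d.2) := by
            simp only [pvAdj, List.mem_cons, List.not_mem_nil, or_false] at hbadj
            rcases hbadj with rfl | rfl | rfl | rfl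
            · exact ⟨(0, 1), by simp, by norm_num [sub_eq_add_neg]⟩
            · exact ⟨(1, 0), by simp, by norm_num [sub_eq_add_neg]⟩
            · exact ⟨(0, -1), by simp, by norm_num [sub_eq_add_neg]⟩
            · exact ⟨(-1, 0), by simp, by norm_num [sub_eq_add_neg]⟩
          obtain ⟨d, hd, rfl⟩ := this
          exact hsub _ (q4 d hd hbok)
        · exact hsub _ (q5 a ha b hbadj hbok)
      · intro T hT hseed hcl x hx
        have hTrc : T (r, c) := hseed ⟨hok, hnv⟩
        have hT1 : ∀ y ∈ vis ++ [(r, c)], T y := by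
          intro y hy
          rcases List.mem_append.mp hy with hy | hy
          · exact hT y hy
          · simp only [List.mem_singleton] at hy; subst hy; exact hTrc
        have := q6 T hcl hTrc hnv hT1
        refine this x ?_
        have hx' : x ∈ vis ++ (r, c) :: added' := hx
        rw [show vis ++ [(r, c)] ++ added' = vis ++ (r, c) :: added' by simp]
        exact hx'

-- post-condition of B's neighbour fold
theorem nbrFold_post (m : List (List Int)) :
    ∀ (nbs stk vis : List (Int × Int)), vis.Nodup →
    ∃ pushed : List (Int × Int),
      (nbs.foldl (fun (sv : List (Int × Int) × List (Int × Int)) nb =>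
          if 0 ≤ nb.1 ∧ nb.1 < (m.length : Int) ∧ 0 ≤ nb.2 ∧ nb.2 < ((m.headD []).length : Int)
              ∧ pvGet2 m nb.1 nb.2 ≠ 0 ∧ nb ∉ sv.2
          then (nb :: sv.1, sv.2 ++ [nb]) else sv) (stk, vis))
        = (pushed.reverse ++ stk, vis ++ pushed) ∧
      (vis ++ pushed).Nodup ∧
      (∀ x ∈ pushed, pvOk m x ∧ x ∈ nbs) ∧
      (∀ b ∈ nbs, pvOk m b → b ∈ vis ++ pushed) ∧
      pushed.length + pvUnvis m (vis ++ pushed) ≤ pvUnvis m vis := by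
  intro nbs
  induction nbs with
  | nil =>
    intro stk vis hN
    exact ⟨[], by simp, by simpa using hN, by simp, by simp, by simp⟩
  | cons nb nbs ih =>
    intro stk vis hN
    simp only [List.foldl_cons]
    by_cases hg : 0 ≤ nb.1 ∧ nb.1 < (m.length : Int) ∧ 0 ≤ nb.2 ∧ nb.2 < ((m.headD []).length : Int)
        ∧ pvGet2 m nb.1 nb.2 ≠ 0 ∧ nb ∉ vis
    · rw [if_pos hg]
      have hok : pvOk m nb := ⟨⟨hg.1, hg.2.1, hg.2.2.1, hg.2.2.2.1⟩, hg.2.2.2.2.1⟩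
      have hnv : nb ∉ vis := hg.2.2.2.2.2
      have hN' : (vis ++ [nb]).Nodup := by
        rw [List.nodup_append]
        refine ⟨hN, List.nodup_singleton _, ?_⟩
        intro a ha b hb
        simp only [List.mem_singleton] at hb
        subst hb
        exact fun h => hnv (h ▸ ha)
      obtain ⟨pushed', h1, h2, h3, h4, h5⟩ := ih (nb :: stk) (vis ++ [nb]) hN'
      refine ⟨nb :: pushed', ?_, ?_, ?_, ?_, ?_⟩
      · rw [h1]; simp
      · simpa using h2
      · intro x hx
        rcases List.mem_cons.mp hx with rfl | hx
        · exact ⟨hok, by simp⟩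
        · exact ⟨(h3 x hx).1, by simp [(h3 x hx).2]⟩
      · intro b hb hbok
        rcases List.mem_cons.mp hb with rfl | hb
        · simp
        · have := h4 b hb hbok
          simpa using this
      · have hlt := pvUnvis_lt (m := m) hok.1 hnv
        have heq : (vis ++ [nb]) ++ pushed' = vis ++ nb :: pushed' := by simp
        rw [heq] at h5
        simp only [List.length_cons]
        omega
    · rw [if_neg hg]
      obtain ⟨pushed, h1, h2, h3, h4, h5⟩ := ih stk vis hN
      refine ⟨pushed, h1, h2, ?_, ?_, h5⟩
      · intro x hx
        exact ⟨(h3 x hx).1, by simp [(h3 x hx).2]⟩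
      · intro b hb hbok
        rcases List.mem_cons.mp hb with rfl | hb
        · have hbv : b ∈ vis := by
            by_contra hbv
            exact hg ⟨hbok.1.1, hbok.1.2.1, hbok.1.2.2.1, hbok.1.2.2.2, hbok.2, hbv⟩
          simp [hbv]
        · exact h4 b hb hbok

-- post-condition of B's while loop
theorem floodB_post (m : List (List Int)) :
    ∀ f (stack vis : List (Int × Int)) (count : Int),
    stack.length + 2 * pvUnvis m vis < f → vis.Nodup →
    (∀ p ∈ stack, p ∈ vis) → (∀ p ∈ stack, pvOk m p) →
    ∃ added : List (Int × Int),
      floodB m f stack vis count = (count + (stack.length : Int) + (added.length : Int), vis ++ added) ∧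
      (vis ++ added).Nodup ∧
      (∀ x ∈ added, pvOk m x) ∧
      (∀ a, (a ∈ stack ∨ a ∈ added) → ∀ b ∈ pvAdj a, pvOk m b → b ∈ vis ++ added) ∧
      (∀ (T : Int × Int → Prop) (base : List (Int × Int)), (∀ x ∈ base, x ∈ vis) →
        ClosedOn m base T → (∀ p ∈ stack, T p ∧ p ∉ base) → ∀ x ∈ added, T x) := by
  intro f
  induction f with
  | zero => intro stack vis count hf; omega
  | succ f ih =>
    intro stack vis count hf hN hsv hso
    match stack with
    | [] =>
      exact ⟨[], by simp [floodB], by simpa using hN, by simp, by simp, by simp⟩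
    | (cr, cc) :: rest =>
      have hfold := nbrFold_post m (pvAdj (cr, cc)) rest vis hN
      obtain ⟨pushed, h1, h2, h3, h4, h5⟩ := hfold
      have hstep : floodB m (f + 1) ((cr, cc) :: rest) vis count
          = floodB m f (pushed.reverse ++ rest) (vis ++ pushed) (count + 1) := by
        show floodB m f ((pvAdj (cr, cc)).foldl _ (rest, vis)).1
              ((pvAdj (cr, cc)).foldl _ (rest, vis)).2 (count + 1)
            = _
        rw [h1]
      have hmono : pvUnvis m (vis ++ pushed) ≤ pvUnvis m vis :=
        pvUnvis_mono (fun x hx => List.mem_append_left _ hx)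
      have hf' : (pushed.reverse ++ rest).length + 2 * pvUnvis m (vis ++ pushed) < f := by
        simp only [List.length_append, List.length_reverse]
        simp only [List.length_cons] at hf
        omega
      have hsv' : ∀ p ∈ pushed.reverse ++ rest, p ∈ vis ++ pushed := by
        intro p hp
        rcases List.mem_append.mp hp with hp | hp
        · exact List.mem_append_right _ (List.mem_reverse.mp hp)
        · exact List.mem_append_left _ (hsv p (List.mem_cons_of_mem _ hp))
      have hso' : ∀ p ∈ pushed.reverse ++ rest, pvOk m p := by
        intro p hp
        rcases List.mem_append.mp hp with hp | hp
        · exact (h3 p (List.mem_reverse.mp hp)).1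
        · exact hso p (List.mem_cons_of_mem _ hp)
      obtain ⟨added₂, g1, g2, g3, g4, g5⟩ := ih (pushed.reverse ++ rest) (vis ++ pushed) (count + 1) hf' h2 hsv' hso'
      refine ⟨pushed ++ added₂, ?_, ?_, ?_, ?_, ?_⟩
      · rw [hstep, g1]
        rw [Prod.mk.injEq]
        constructor
        · simp only [List.length_append, List.length_reverse, List.length_cons]
          push_cast
          ring
        · simp [List.append_assoc]
      · simpa [List.append_assoc] using g2
      · intro x hx
        rcases List.mem_append.mp hx with hx | hx
        · exact (h3 x hx).1
        · exact g3 x hx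
      · intro a ha b hb hbok
        have hsub : ∀ y, y ∈ (vis ++ pushed) ++ added₂ → y ∈ vis ++ (pushed ++ added₂) := by
          intro y hy; simpa [List.append_assoc] using hy
        rcases ha with ha | ha
        · rcases List.mem_cons.mp ha with rfl | ha
          · -- a is the popped head: its ok neighbours end in vis ++ pushed
            have := h4 b hb hbok
            exact hsub b (List.mem_append_left _ this)
          · -- a ∈ rest ⊆ new stack
            exact hsub b (g4 a (Or.inl (List.mem_append_right _ ha)) b hb hbok)
        · rcases List.mem_append.mp ha with ha | ha
          · -- a ∈ pushed ⊆ new stack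
            exact hsub b (g4 a (Or.inl (List.mem_append_left _ (List.mem_reverse.mpr ha))) b hb hbok)
          · exact hsub b (g4 a (Or.inr ha) b hb hbok)
      · intro T base hbase hcl hstk x hx
        have hTpush : ∀ p ∈ pushed, T p ∧ p ∉ base := by
          intro p hp
          have hpa : p ∈ pvAdj (cr, cc) := (h3 p hp).2
          have hpo : pvOk m p := (h3 p hp).1
          have hpv : p ∉ vis := nodup_disj h2 hp
          have hpb : p ∉ base := fun hc => hpv (hbase p hc)
          have hhd := hstk (cr, cc) (List.mem_cons_self)
          exact ⟨hcl (cr, cc) hhd.1 hhd.2 p hpa hpo hpb, hpb⟩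
        rcases List.mem_append.mp hx with hx | hx
        · exact (hTpush x hx).1
        · refine g5 T base (fun y hy => List.mem_append_left _ (hbase y hy)) hcl ?_ x hx
          intro p hp
          rcases List.mem_append.mp hp with hp | hp
          · exact hTpush p (List.mem_reverse.mp hp)
          · exact hstk p (List.mem_cons_of_mem _ hp)

-- one seeded component: the DFS count equals the flood-fill count, and the two
-- visited lists end with the same membership
theorem component_eq (m : List (List Int)) (r c : Int) (visA visB : List (Int × Int))
    (hNA : visA.Nodup) (hNB : visB.Nodup) (hm : ∀ x, x ∈ visA ↔ x ∈ visB)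
    (hok : pvOk m (r, c)) (hnv : (r, c) ∉ visA) :
    ∃ (nA : Int) (visA' : List (Int × Int)) (nB : Int) (visB' : List (Int × Int)),
      dfsA m (m.length * (m.headD []).length + 1) r c visA = (nA, visA') ∧
      floodB m (2 * m.length * (m.headD []).length + 2) [(r, c)] (visB ++ [(r, c)]) 0 = (nB, visB') ∧
      nA = nB ∧ visA'.Nodup ∧ visB'.Nodup ∧ (∀ x, x ∈ visA' ↔ x ∈ visB') := by
  have hleA := pvUnvis_le m visA
  obtain ⟨addedA, a1, a2, a3, a4, a5, a6⟩ :=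
    dfsA_post m (m.length * (m.headD []).length + 1) r c visA (by omega) hNA
  have hnvB : (r, c) ∉ visB := fun h => hnv ((hm _).mpr h)
  have hNB1 : (visB ++ [(r, c)]).Nodup := by
    rw [List.nodup_append]
    refine ⟨hNB, List.nodup_singleton _, ?_⟩
    intro a ha b hb
    simp only [List.mem_singleton] at hb
    subst hb
    exact fun h => hnvB (h ▸ ha)
  have hleB := pvUnvis_le m (visB ++ [(r, c)])
  have hfB : ([(r, c)] : List (Int × Int)).length + 2 * pvUnvis m (visB ++ [(r, c)])
      < 2 * m.length * (m.headD []).length + 2 := by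
    have h2 : 2 * m.length * (m.headD []).length = 2 * (m.length * (m.headD []).length) := by ring
    simp only [List.length_singleton]
    omega
  obtain ⟨addedB, b1, b2, b3, b4, b5⟩ :=
    floodB_post m (2 * m.length * (m.headD []).length + 2) [(r, c)] (visB ++ [(r, c)]) 0
      hfB hNB1 (by simp) (by simpa using hok)
  refine ⟨(addedA.length : Int), visA ++ addedA,
    0 + (([(r, c)] : List (Int × Int)).length : Int) + (addedB.length : Int),
    (visB ++ [(r, c)]) ++ addedB, a1, b1, ?_, a2, b2, ?_⟩
  -- membership equality first (it also gives the count equality)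
  · -- counts
    have hmemAB : ∀ x, x ∈ visA ++ addedA ↔ x ∈ (visB ++ [(r, c)]) ++ addedB := by
      intro x
      constructor
      · intro hx
        refine a6 (fun y => y ∈ (visB ++ [(r, c)]) ++ addedB) ?_ ?_ ?_ x hx
        · intro y hy
          exact List.mem_append_left _ (List.mem_append_left _ ((hm _).mp hy))
        · intro _
          exact List.mem_append_left _ (List.mem_append_right _ (by simp))
        · intro a ha hav b hbadj hbok hbv
          have haB : a ∈ [(r, c)] ∨ a ∈ addedB := by
            rcases List.mem_append.mp ha with ha | ha
            · rcases List.mem_append.mp ha with ha | ha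
              · exact absurd ((hm _).mpr ha) hav
              · exact Or.inl ha
            · exact Or.inr ha
          exact b4 a haB b hbadj hbok
      · intro hx
        rcases List.mem_append.mp hx with hx | hx
        · rcases List.mem_append.mp hx with hx | hx
          · exact List.mem_append_left _ ((hm _).mpr hx)
          · simp only [List.mem_singleton] at hx
            subst hx
            exact a4 ⟨hok, hnv⟩
        · refine b5 (fun y => y ∈ visA ++ addedA) visB
            (fun y hy => List.mem_append_left _ hy) ?_ ?_ x hx
          · intro a ha hav b hbadj hbok hbv
            have haA : a ∈ addedA := by
              rcases List.mem_append.mp ha with ha | ha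
              · exact absurd ((hm _).mp ha) hav
              · exact ha
            exact a5 a haA b hbadj hbok
          · intro p hp
            simp only [List.mem_singleton] at hp
            subst hp
            exact ⟨a4 ⟨hok, hnv⟩, hnvB⟩
    have hperm : List.Perm (visA ++ addedA) ((visB ++ [(r, c)]) ++ addedB) :=
      (List.perm_ext_iff_of_nodup a2 b2).mpr hmemAB
    have hlen := hperm.length_eq
    have hlenv : visA.length = visB.length := by
      have : List.Perm visA visB := (List.perm_ext_iff_of_nodup hNA hNB).mpr hm
      exact this.length_eq
    have hlen' : visA.length + addedA.length = visB.length + 1 + addedB.length := by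
      have := hlen
      simp only [List.length_append, List.length_singleton] at this
      omega
    simp only [List.length_singleton]
    push_cast
    omega
  · intro x
    constructor
    · intro hx
      refine a6 (fun y => y ∈ (visB ++ [(r, c)]) ++ addedB) ?_ ?_ ?_ x hx
      · intro y hy
        exact List.mem_append_left _ (List.mem_append_left _ ((hm _).mp hy))
      · intro _
        exact List.mem_append_left _ (List.mem_append_right _ (by simp))
      · intro a ha hav b hbadj hbok hbv
        have haB : a ∈ [(r, c)] ∨ a ∈ addedB := by
          rcases List.mem_append.mp ha with ha | ha
          · rcases List.mem_append.mp ha with ha | ha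
            · exact absurd ((hm _).mpr ha) hav
            · exact Or.inl ha
          · exact Or.inr ha
        exact b4 a haB b hbadj hbok
    · intro hx
      rcases List.mem_append.mp hx with hx | hx
      · rcases List.mem_append.mp hx with hx | hx
        · exact List.mem_append_left _ ((hm _).mpr hx)
        · simp only [List.mem_singleton] at hx
          subst hx
          exact a4 ⟨hok, hnv⟩
      · refine b5 (fun y => y ∈ visA ++ addedA) visB
          (fun y hy => List.mem_append_left _ hy) ?_ ?_ x hx
        · intro a ha hav b hbadj hbok hbv
          have haA : a ∈ addedA := by
            rcases List.mem_append.mp ha with ha | ha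
            · exact absurd ((hm _).mp ha) hav
            · exact ha
          exact a5 a haA b hbadj hbok
        · intro p hp
          simp only [List.mem_singleton] at hp
          subst hp
          exact ⟨a4 ⟨hok, hnv⟩, hnvB⟩

-- the two scan loops stay in lockstep
theorem innerFold_eq (m : List (List Int)) (rowIdx : Nat) (hrow : rowIdx < m.length) :
    ∀ (cs : List Nat) (sA sB : List Int × List (Int × Int)),
    sA.1 = sB.1 → sA.2.Nodup → sB.2.Nodup → (∀ x, x ∈ sA.2 ↔ x ∈ sB.2) →
    (∀ c ∈ cs, c < (m.headD []).length) →
    ((cs.foldl (fun (st : List Int × List (Int × Int)) (colIdx : Nat) =>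
        if ((rowIdx : Int), (colIdx : Int)) ∉ st.2 ∧ pvGet2 m rowIdx colIdx = 1 then
          let q := dfsA m (m.length * (m.headD []).length + 1) rowIdx colIdx st.2
          (st.1 ++ [q.1], q.2)
        else st) sA).1
      = (cs.foldl (fun (st : List Int × List (Int × Int)) (c : Nat) =>
        if ((rowIdx : Int), (c : Int)) ∉ st.2 ∧ pvGet2 m rowIdx c = 1 then
          let q := floodB m (2 * m.length * (m.headD []).length + 2) [((rowIdx : Int), (c : Int))]
                     (st.2 ++ [((rowIdx : Int), (c : Int))]) 0
          (st.1 ++ [q.1], q.2)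
        else st) sB).1) ∧
    (cs.foldl (fun (st : List Int × List (Int × Int)) (colIdx : Nat) =>
        if ((rowIdx : Int), (colIdx : Int)) ∉ st.2 ∧ pvGet2 m rowIdx colIdx = 1 then
          let q := dfsA m (m.length * (m.headD []).length + 1) rowIdx colIdx st.2
          (st.1 ++ [q.1], q.2)
        else st) sA).2.Nodup ∧
    (cs.foldl (fun (st : List Int × List (Int × Int)) (c : Nat) =>
        if ((rowIdx : Int), (c : Int)) ∉ st.2 ∧ pvGet2 m rowIdx c = 1 then
          let q := floodB m (2 * m.length * (m.headD []).length + 2) [((rowIdx : Int), (c : Int))]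
                     (st.2 ++ [((rowIdx : Int), (c : Int))]) 0
          (st.1 ++ [q.1], q.2)
        else st) sB).2.Nodup ∧
    (∀ x, x ∈ (cs.foldl (fun (st : List Int × List (Int × Int)) (colIdx : Nat) =>
        if ((rowIdx : Int), (colIdx : Int)) ∉ st.2 ∧ pvGet2 m rowIdx colIdx = 1 then
          let q := dfsA m (m.length * (m.headD []).length + 1) rowIdx colIdx st.2
          (st.1 ++ [q.1], q.2)
        else st) sA).2 ↔ x ∈ (cs.foldl (fun (st : List Int × List (Int × Int)) (c : Nat) =>
        if ((rowIdx : Int), (c : Int)) ∉ st.2 ∧ pvGet2 m rowIdx c = 1 then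
          let q := floodB m (2 * m.length * (m.headD []).length + 2) [((rowIdx : Int), (c : Int))]
                     (st.2 ++ [((rowIdx : Int), (c : Int))]) 0
          (st.1 ++ [q.1], q.2)
        else st) sB).2) := by
  intro cs
  induction cs with
  | nil => intro sA sB h1 h2 h3 h4 _; exact ⟨h1, h2, h3, h4⟩
  | cons c cs ih =>
    intro sA sB h1 h2 h3 h4 hcs
    have hc : c < (m.headD []).length := hcs c List.mem_cons_self
    simp only [List.foldl_cons]
    by_cases hA : ((rowIdx : Int), (c : Int)) ∉ sA.2 ∧ pvGet2 m rowIdx c = 1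
    · have hB : ((rowIdx : Int), (c : Int)) ∉ sB.2 ∧ pvGet2 m rowIdx c = 1 :=
        ⟨fun hmem => hA.1 ((h4 _).mpr hmem), hA.2⟩
      rw [if_pos hA, if_pos hB]
      have hok : pvOk m ((rowIdx : Int), (c : Int)) := by
        refine ⟨⟨?_, ?_, ?_, ?_⟩, ?_⟩
        · show (0 : Int) ≤ (rowIdx : Int); positivity
        · show ((rowIdx : Int)) < (m.length : Int); exact_mod_cast hrow
        · show (0 : Int) ≤ (c : Int); positivity
        · show ((c : Int)) < ((m.headD []).length : Int); exact_mod_cast hc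
        · show pvGet2 m (rowIdx : Int) (c : Int) ≠ 0
          rw [hA.2]; norm_num
      obtain ⟨nA, visA', nB, visB', eqA, eqB, hn, hNA', hNB', hm'⟩ :=
        component_eq m (rowIdx : Int) (c : Int) sA.2 sB.2 h2 h3 h4 hok hA.1
      simp only [eqA, eqB]
      exact ih (sA.1 ++ [nA], visA') (sB.1 ++ [nB], visB')
        (by simp [h1, hn]) hNA' hNB' hm' (fun c' hc' => hcs c' (List.mem_cons_of_mem _ hc'))
    · have hB : ¬(((rowIdx : Int), (c : Int)) ∉ sB.2 ∧ pvGet2 m rowIdx c = 1) := by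
        intro hB
        exact hA ⟨fun hmem => hB.1 ((h4 _).mp hmem), hB.2⟩
      rw [if_neg hA, if_neg hB]
      exact ih sA sB h1 h2 h3 h4 (fun c' hc' => hcs c' (List.mem_cons_of_mem _ hc'))

theorem outerFold_eq (m : List (List Int)) :
    ∀ (rs : List Nat) (sA sB : List Int × List (Int × Int)),
    sA.1 = sB.1 → sA.2.Nodup → sB.2.Nodup → (∀ x, x ∈ sA.2 ↔ x ∈ sB.2) →
    (∀ r ∈ rs, r < m.length) →
    ((rs.foldl (fun (st : List Int × List (Int × Int)) (rowIdx : Nat) =>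
      (List.range (m.headD []).length).foldl (fun (st : List Int × List (Int × Int)) (colIdx : Nat) =>
        if ((rowIdx : Int), (colIdx : Int)) ∉ st.2 ∧ pvGet2 m rowIdx colIdx = 1 then
          let q := dfsA m (m.length * (m.headD []).length + 1) rowIdx colIdx st.2
          (st.1 ++ [q.1], q.2)
        else st) st) sA).1
      = (rs.foldl (fun (st : List Int × List (Int × Int)) (r : Nat) =>
      (List.range (m.headD []).length).foldl (fun (st : List Int × List (Int × Int)) (c : Nat) =>
        if ((r : Int), (c : Int)) ∉ st.2 ∧ pvGet2 m r c = 1 then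
          let q := floodB m (2 * m.length * (m.headD []).length + 2) [((r : Int), (c : Int))]
                     (st.2 ++ [((r : Int), (c : Int))]) 0
          (st.1 ++ [q.1], q.2)
        else st) st) sB).1) ∧
    (rs.foldl (fun (st : List Int × List (Int × Int)) (rowIdx : Nat) =>
      (List.range (m.headD []).length).foldl (fun (st : List Int × List (Int × Int)) (colIdx : Nat) =>
        if ((rowIdx : Int), (colIdx : Int)) ∉ st.2 ∧ pvGet2 m rowIdx colIdx = 1 then
          let q := dfsA m (m.length * (m.headD []).length + 1) rowIdx colIdx st.2
          (st.1 ++ [q.1], q.2)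
        else st) st) sA).2.Nodup ∧
    (rs.foldl (fun (st : List Int × List (Int × Int)) (r : Nat) =>
      (List.range (m.headD []).length).foldl (fun (st : List Int × List (Int × Int)) (c : Nat) =>
        if ((r : Int), (c : Int)) ∉ st.2 ∧ pvGet2 m r c = 1 then
          let q := floodB m (2 * m.length * (m.headD []).length + 2) [((r : Int), (c : Int))]
                     (st.2 ++ [((r : Int), (c : Int))]) 0
          (st.1 ++ [q.1], q.2)
        else st) st) sB).2.Nodup ∧
    (∀ x, x ∈ (rs.foldl (fun (st : List Int × List (Int × Int)) (rowIdx : Nat) =>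
      (List.range (m.headD []).length).foldl (fun (st : List Int × List (Int × Int)) (colIdx : Nat) =>
        if ((rowIdx : Int), (colIdx : Int)) ∉ st.2 ∧ pvGet2 m rowIdx colIdx = 1 then
          let q := dfsA m (m.length * (m.headD []).length + 1) rowIdx colIdx st.2
          (st.1 ++ [q.1], q.2)
        else st) st) sA).2 ↔ x ∈ (rs.foldl (fun (st : List Int × List (Int × Int)) (r : Nat) =>
      (List.range (m.headD []).length).foldl (fun (st : List Int × List (Int × Int)) (c : Nat) =>
        if ((r : Int), (c : Int)) ∉ st.2 ∧ pvGet2 m r c = 1 then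
          let q := floodB m (2 * m.length * (m.headD []).length + 2) [((r : Int), (c : Int))]
                     (st.2 ++ [((r : Int), (c : Int))]) 0
          (st.1 ++ [q.1], q.2)
        else st) st) sB).2) := by
  intro rs
  induction rs with
  | nil => intro sA sB h1 h2 h3 h4 _; exact ⟨h1, h2, h3, h4⟩
  | cons r rs ih =>
    intro sA sB h1 h2 h3 h4 hrs
    have hr : r < m.length := hrs r List.mem_cons_self
    simp only [List.foldl_cons]
    obtain ⟨g1, g2, g3, g4⟩ := innerFold_eq m r hr (List.range (m.headD []).length) sA sB
      h1 h2 h3 h4 (fun c hc => List.mem_range.mp hc)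
    exact ih _ _ g1 g2 g3 g4 (fun r' hr' => hrs r' (List.mem_cons_of_mem _ hr'))

-- ===== VERDICT (by name: the statement is the Claim_ definition above) =====
theorem riverSizes_spec : Claim_equal_riverSizes := by
  intro matrix _ _
  show riverSizes matrix = riverSizes_alt matrix
  simp only [riverSizes, riverSizes_alt]
  exact (outerFold_eq matrix (List.range matrix.length) ([], []) ([], [])
    rfl List.nodup_nil List.nodup_nil (fun x => Iff.rfl)
    (fun r hr => List.mem_range.mp hr)).1
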